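-- pv_equiv track=rewrite | github.com/agamenonjunior/Python | Desafios.py | calcula_minimo_2
-- ===== SOURCE A (Python) =====
-- def  calcula_minimo_2(L):
--     L2=[]
--     soma = 0
--     for num in (L):
--        min1=min(L)
--        if num != min1:
--           L2.append(num)
--           min2 = min(L2)
--        soma = min1 + min2
--     return (soma)
-- ===== SOURCE B (Python) =====
-- def calcula_minimo_2(L):
--     if not L:
--         return 0
--     m = min(L)
--     return m + min(x for x in L if x != m)
-- ===== Notes on version B (the rewrite author's own statement) =====
-- stated objective: faster
-- what changed: A recomputes min(L) and min(L2) inside the loop on a growing list (quadratic); B computes min(L) once and the minimum of the non-minimal elements in one filtered pass (linear).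
import Mathlib
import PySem

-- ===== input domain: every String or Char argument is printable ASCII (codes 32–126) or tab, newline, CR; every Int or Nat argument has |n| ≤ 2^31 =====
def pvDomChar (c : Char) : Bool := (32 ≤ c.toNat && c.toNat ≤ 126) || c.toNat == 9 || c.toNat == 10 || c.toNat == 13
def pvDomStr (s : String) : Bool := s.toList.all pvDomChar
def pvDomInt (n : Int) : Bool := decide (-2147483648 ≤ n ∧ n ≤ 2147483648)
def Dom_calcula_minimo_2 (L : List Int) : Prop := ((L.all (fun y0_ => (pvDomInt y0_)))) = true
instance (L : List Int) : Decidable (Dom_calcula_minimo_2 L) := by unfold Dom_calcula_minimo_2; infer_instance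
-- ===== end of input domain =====

-- B computes min(L) once and the minimum of the non-minimal elements in one filtered pass,
-- replacing A's per-iteration recomputation of min(L) and min(L2) (objective: faster, asymptotic).


-- ===== PORT A =====
-- loop body of A: min1 = min(L); if num != min1: L2.append(num); min2 = min(L2); soma = min1 + min2
-- state = (L2, min2?, soma); min2? = none models Python's still-unbound min2 (reading it raises
-- UnboundLocalError, excluded by Pre_; '.getD 0' is only reached there).
def stepA (L : List Int) (st : List Int × Option Int × Int) (num : Int) : List Int × Option Int × Int :=
  let min1 : Int := (PySem.List.min? L (fun y => y)).getD 0
  if num ≠ min1 then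
    let L2 := st.1 ++ [num]
    let min2 := PySem.List.min? L2 (fun y => y)
    (L2, min2, min1 + min2.getD 0)
  else
    (st.1, st.2.1, min1 + st.2.1.getD 0)

def calcula_minimo_2 (L : List Int) : Int :=
  (L.foldl (stepA L) ([], none, 0)).2.2

-- ===== PORT B =====
-- '.getD 0' models min() of an empty sequence (ValueError), reached only outside Pre_.
def calcula_minimo_2_alt (L : List Int) : Int :=
  match L with
  | [] => 0
  | _ :: _ =>
    let m := (PySem.List.min? L (fun y => y)).getD 0
    m + (PySem.List.min? (L.filter (fun x => x ≠ m)) (fun y => y)).getD 0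

-- ===== PRECONDITION & SPEC =====
-- A raises UnboundLocalError (min2 unbound at the first 'soma = min1 + min2') on every non-empty
-- list whose first element equals min(L); Pre_ excludes exactly those.
def Pre_calcula_minimo_2 (L : List Int) : Prop :=
  L = [] ∨ L.head? ≠ PySem.List.min? L (fun y => y)
instance (L : List Int) : Decidable (Pre_calcula_minimo_2 L) := by
  unfold Pre_calcula_minimo_2; infer_instance

def pvWitness_calcula_minimo_2 : List Int := [2, 1]

def Spec_calcula_minimo_2 (L : List Int) (out : Int) : Prop := out = calcula_minimo_2_alt L
instance (L : List Int) (out : Int) : Decidable (Spec_calcula_minimo_2 L out) := by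
  unfold Spec_calcula_minimo_2; infer_instance

-- ===== CLAIM (what is proved, stated in full; the proofs are below) =====
def Claim_equal_calcula_minimo_2 : Prop :=
  ∀ (L : List Int), Dom_calcula_minimo_2 L → Pre_calcula_minimo_2 L →
    Spec_calcula_minimo_2 L (calcula_minimo_2 L)

-- ===== LEMMAS AND PROOFS =====
lemma min_append_single (xs : List Int) (v a : Int)
    (h : PySem.List.min? xs (fun y => y) = some v) :
    PySem.List.min? (xs ++ [a]) (fun y => y) = some (min v a) := by
  cases xs with
  | nil =>
    rw [show PySem.List.min? ([] : List Int) (fun y => y) = none from rfl] at h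
    exact absurd h (by simp)
  | cons x t =>
    rw [PySem.List.min?_id_cons] at h
    rw [List.cons_append, PySem.List.min?_id_cons, List.foldl_append]
    simp_all

lemma loop_inv (L : List Int) (m : Int)
    (hm : (PySem.List.min? L (fun y => y)).getD 0 = m) :
    ∀ (rest L2 : List Int) (v : Int),
      PySem.List.min? L2 (fun y => y) = some v →
      (rest.foldl (stepA L) (L2, some v, m + v)).2.2
        = m + (rest.filter (fun x => x ≠ m)).foldl min v := by
  intro rest
  induction rest with
  | nil => intro L2 v _; rfl
  | cons num rest ih =>
    intro L2 v hv
    by_cases hnum : num = m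
    · have hstep : stepA L (L2, some v, m + v) num = (L2, some v, m + v) := by
        simp [stepA, hm, hnum]
      simp only [List.foldl_cons, hstep]
      rw [ih L2 v hv]
      simp [hnum]
    · have hmin2 := min_append_single L2 v num hv
      have hstep : stepA L (L2, some v, m + v) num
          = (L2 ++ [num], some (min v num), m + min v num) := by
        simp [stepA, hm, hnum, hmin2]
      simp only [List.foldl_cons, hstep, List.filter_cons]
      rw [ih (L2 ++ [num]) (min v num) hmin2]
      simp [hnum]

-- ===== VERDICT (by name: the statement is the Claim_ definition above) =====
theorem calcula_minimo_2_spec : Claim_equal_calcula_minimo_2 := by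
  intro L _ hPre
  unfold Spec_calcula_minimo_2
  cases L with
  | nil => rfl
  | cons h t =>
    have hmin : PySem.List.min? (h :: t) (fun y => y) = some (t.foldl min h) :=
      PySem.List.min?_id_cons h t
    generalize hMdef : t.foldl min h = m at hmin
    have hne : h ≠ m := by
      rcases hPre with h1 | h1
      · simp at h1
      · simp only [List.head?, hmin] at h1
        intro hc; exact h1 (by rw [hc])
    -- A side
    have hgetD : (PySem.List.min? (h :: t) (fun y => y)).getD 0 = m := by rw [hmin]; rfl
    have hstep0 : stepA (h :: t) ([], none, 0) h = ([h], some h, m + h) := by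
      simp [stepA, hmin, hne, PySem.List.min?_id_cons]
    have hA : calcula_minimo_2 (h :: t)
        = m + (t.filter (fun x => x ≠ m)).foldl min h := by
      unfold calcula_minimo_2
      simp only [List.foldl_cons, hstep0]
      exact loop_inv (h :: t) m hgetD t [h] h (by simp [PySem.List.min?_id_cons])
    -- B side
    have hB : calcula_minimo_2_alt (h :: t)
        = m + (t.filter (fun x => x ≠ m)).foldl min h := by
      unfold calcula_minimo_2_alt
      simp only [hgetD, List.filter_cons]
      rw [if_pos (by simp [hne]), PySem.List.min?_id_cons]
      rfl
    rw [hA, hB]
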